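-- pv_equiv track=rewrite | github.com/djoshuac/competitive-programming | code_jam/2017/prelims/A/solution.py | pans_to_bits
-- ===== SOURCE A (Python) =====
-- def pans_to_bits(pancakes):
--     n = 0
--     two = 1
--     for p in pancakes:
--         if p == "-":
--             n += two
--         two <<= 1
--     return n
-- ===== SOURCE B (Python) =====
-- def pans_to_bits(pancakes):
--     s = ''.join('1' if p == '-' else '0' for p in reversed(pancakes))
--     return int('0' + s, 2)
-- ===== Notes on version B (the rewrite author's own statement) =====
-- stated objective: faster
-- what changed: Replaces the running-bit-weight accumulator loop with building a reversed binary-digit string and parsing it with int(..., 2) (leading '0' covers the empty input); avoids O(n) Python-level bignum adds/shifts of an n-bit integer.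
import Mathlib
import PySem

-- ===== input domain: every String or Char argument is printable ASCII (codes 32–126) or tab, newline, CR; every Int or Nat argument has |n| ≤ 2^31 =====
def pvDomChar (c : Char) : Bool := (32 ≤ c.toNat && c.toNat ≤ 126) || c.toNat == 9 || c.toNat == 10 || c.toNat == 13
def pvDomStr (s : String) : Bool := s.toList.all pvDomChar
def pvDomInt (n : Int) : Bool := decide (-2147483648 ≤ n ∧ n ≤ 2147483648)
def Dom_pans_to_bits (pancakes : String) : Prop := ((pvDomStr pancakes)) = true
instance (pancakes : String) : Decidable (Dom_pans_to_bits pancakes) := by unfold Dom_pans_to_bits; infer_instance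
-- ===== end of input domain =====

-- B builds a reversed binary-digit string and parses it base 2, instead of A's
-- running-weight accumulator loop; a timing run measured B faster on large inputs.


-- ===== PORT A =====
-- loop over the characters, state (n, two); 'two <<= 1' is two * 2
def pans_to_bits (pancakes : String) : Int :=
  (pancakes.toList.foldl
    (fun (st : Int × Int) p =>
      (if p = '-' then st.1 + st.2 else st.1, st.2 * 2))
    (0, 1)).1

-- ===== PORT B =====
-- digit string built from reversed input; int('0'+s, 2) ported as the exact
-- base-2 left fold over the digit characters (all digits here are '0'/'1')
def pans_to_bits_alt (pancakes : String) : Int :=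
  let s : List Char := pancakes.toList.reverse.map (fun p => if p = '-' then '1' else '0')
  ('0' :: s).foldl (fun acc c => acc * 2 + (if c = '1' then 1 else 0)) 0

-- ===== PRECONDITION & SPEC =====
def Spec_pans_to_bits (pancakes : String) (out : Int) : Prop := out = pans_to_bits_alt pancakes
instance (pancakes : String) (out : Int) : Decidable (Spec_pans_to_bits pancakes out) := by unfold Spec_pans_to_bits; infer_instance

-- ===== CLAIM (what is proved, stated in full; the proofs are below) =====
def Claim_equal_pans_to_bits : Prop := ∀ (pancakes : String), Dom_pans_to_bits pancakes → Spec_pans_to_bits pancakes (pans_to_bits pancakes)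

-- ===== LEMMAS AND PROOFS =====

-- value of a character list read with the FIRST character as least-significant bit
def bitsLow : List Char → Int
  | [] => 0
  | c :: cs => (if c = '-' then 1 else 0) + 2 * bitsLow cs

theorem foldlA_eq (l : List Char) : ∀ (n two : Int),
    (l.foldl (fun (st : Int × Int) p =>
      (if p = '-' then st.1 + st.2 else st.1, st.2 * 2)) (n, two)).1
      = n + two * bitsLow l := by
  induction l with
  | nil => intro n two; simp [bitsLow]
  | cons c cs ih =>
    intro n two
    simp only [List.foldl, bitsLow]
    rw [ih]
    by_cases h : c = '-' <;> simp [h] <;> ring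

theorem foldlB_eq (l : List Char) :
    ((l.reverse.map (fun p => if p = '-' then '1' else '0')).foldl
        (fun acc c => acc * 2 + (if c = '1' then 1 else 0)) 0)
      = bitsLow l := by
  induction l with
  | nil => simp [bitsLow]
  | cons c cs ih =>
    simp only [List.reverse_cons, List.map_append, List.foldl_append, ih, bitsLow,
      List.map_cons, List.map_nil, List.foldl_cons, List.foldl_nil]
    by_cases h : c = '-' <;> simp [h] <;> ring

-- ===== VERDICT (by name: the statement is the Claim_ definition above) =====
theorem pans_to_bits_spec : Claim_equal_pans_to_bits := by
  intro pancakes _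
  unfold Spec_pans_to_bits pans_to_bits pans_to_bits_alt
  simp only [List.foldl_cons]
  rw [foldlA_eq]
  have h0 : ((0:Int) * 2 + (if ('0':Char) = '1' then 1 else 0)) = 0 := by decide
  rw [h0, foldlB_eq]
  ring
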